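-- pv_equiv track=rewrite | github.com/Baysuk728/ClingySOCKs-Community | memory/src/integrations/local_vault.py | _rewrite_for_openrouter
-- ===== SOURCE A (Python) =====
-- from typing import Optional
--
-- _PROVIDER_TO_OPENROUTER_PREFIX: dict[str, str] = {
--     "gemini": "openrouter/google/",
--     "openai": "openrouter/openai/",
--     "anthropic": "openrouter/anthropic/",
--     "xai": "openrouter/xai/",
-- }
--
-- def _rewrite_for_openrouter(model: str, provider: Optional[str]) -> str:
--     bare_model = model
--     for prefix in ["gemini/", "openai/", "anthropic/", "xai/"]:
--         if model.lower().startswith(prefix):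
--             bare_model = model[len(prefix):]
--             break
--     if provider and provider in _PROVIDER_TO_OPENROUTER_PREFIX:
--         return _PROVIDER_TO_OPENROUTER_PREFIX[provider] + bare_model
--     return f"openrouter/{bare_model}"
-- ===== SOURCE B (Python) =====
-- from typing import Optional
--
-- _PROVIDER_TO_OPENROUTER_PREFIX: dict[str, str] = {
--     "gemini": "openrouter/google/",
--     "openai": "openrouter/openai/",
--     "anthropic": "openrouter/anthropic/",
--     "xai": "openrouter/xai/",
-- }
--
-- def _rewrite_for_openrouter(model: str, provider: Optional[str]) -> str:
--     head, sep, rest = model.partition("/")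
--     bare_model = rest if sep and head.lower() in _PROVIDER_TO_OPENROUTER_PREFIX else model
--     if provider and provider in _PROVIDER_TO_OPENROUTER_PREFIX:
--         return _PROVIDER_TO_OPENROUTER_PREFIX[provider] + bare_model
--     return "openrouter/" + bare_model
-- ===== Notes on version B (the rewrite author's own statement) =====
-- stated objective: simpler
-- what changed: Replaces A's loop over four candidate '<name>/' prefixes (lowercasing and prefix-testing the whole model each iteration, with an early break) by a single partition of the model at its first '/' followed by one case-folded membership test against the provider dict's keys; the provider-prefix lookup and 'openrouter/' default are unchanged.
import Mathlib
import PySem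

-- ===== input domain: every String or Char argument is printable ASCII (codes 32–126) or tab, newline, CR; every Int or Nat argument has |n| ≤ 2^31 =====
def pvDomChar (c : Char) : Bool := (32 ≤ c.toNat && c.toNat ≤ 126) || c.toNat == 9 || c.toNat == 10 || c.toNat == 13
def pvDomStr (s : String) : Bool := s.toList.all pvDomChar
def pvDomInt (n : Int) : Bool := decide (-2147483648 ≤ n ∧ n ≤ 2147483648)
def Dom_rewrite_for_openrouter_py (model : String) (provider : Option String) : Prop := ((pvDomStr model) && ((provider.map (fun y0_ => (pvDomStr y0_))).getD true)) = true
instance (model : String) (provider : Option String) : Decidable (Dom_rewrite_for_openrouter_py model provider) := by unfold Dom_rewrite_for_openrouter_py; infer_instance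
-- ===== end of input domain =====

-- B replaces A's loop over four candidate "<name>/" prefixes by a single partition of the
-- model string at its first '/' plus one case-folded key-membership test (objective: simpler).

-- shared module constant: the literal dict _PROVIDER_TO_OPENROUTER_PREFIX (identical in Source A and Source B)
def pvDict : PySem.Dict (List Char) (List Char) :=
  PySem.Dict.ofList
    [("gemini".toList, "openrouter/google/".toList),
     ("openai".toList, "openrouter/openai/".toList),
     ("anthropic".toList, "openrouter/anthropic/".toList),
     ("xai".toList, "openrouter/xai/".toList)]

-- ===== PORT A =====
-- the 'for prefix in [...]' loop with its early break: try each prefix in order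
def pvStripLoop (model : List Char) : List (List Char) → List Char
  | [] => model
  | p :: ps =>
      if PySem.Chars.startswith (PySem.Chars.lower model) p then
        PySem.List.slice model (some (PySem.List.len p)) none
      else pvStripLoop model ps

def rewrite_for_openrouter_py (model : String) (provider : Option String) : String :=
  let bare := pvStripLoop model.toList
    ["gemini/".toList, "openai/".toList, "anthropic/".toList, "xai/".toList]
  match provider with
  | some p =>
      if (!p.toList.isEmpty) && pvDict.contains p.toList then
        String.ofList (pvDict.getD p.toList [] ++ bare)
      else String.ofList ("openrouter/".toList ++ bare)
  | none => String.ofList ("openrouter/".toList ++ bare)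

-- ===== PORT B =====
-- hand port of str.partition(sep) for a one-character separator (not in PySem); exact:
-- returns (part before first sep, [sep], part after), or (s, [], []) when sep does not occur
def pvPartition (sep : Char) : List Char → List Char × List Char × List Char
  | [] => ([], [], [])
  | c :: cs =>
      if c = sep then ([], [sep], cs)
      else (c :: (pvPartition sep cs).1, (pvPartition sep cs).2.1, (pvPartition sep cs).2.2)

def rewrite_for_openrouter_py_alt (model : String) (provider : Option String) : String :=
  let parts := pvPartition '/' model.toList
  let bare :=
    if (!parts.2.1.isEmpty) && pvDict.contains (PySem.Chars.lower parts.1) then parts.2.2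
    else model.toList
  match provider with
  | some p =>
      if (!p.toList.isEmpty) && pvDict.contains p.toList then
        String.ofList (pvDict.getD p.toList [] ++ bare)
      else String.ofList ("openrouter/".toList ++ bare)
  | none => String.ofList ("openrouter/".toList ++ bare)

-- ===== PRECONDITION & SPEC =====
def Spec_rewrite_for_openrouter_py (model : String) (provider : Option String) (out : String) : Prop := out = rewrite_for_openrouter_py_alt model provider
instance (model : String) (provider : Option String) (out : String) : Decidable (Spec_rewrite_for_openrouter_py model provider out) := by unfold Spec_rewrite_for_openrouter_py; infer_instance

-- ===== CLAIM (what is proved, stated in full; the proofs are below) =====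
def Claim_equal_rewrite_for_openrouter_py : Prop := ∀ (model : String) (provider : Option String), Dom_rewrite_for_openrouter_py model provider → Spec_rewrite_for_openrouter_py model provider (rewrite_for_openrouter_py model provider)

-- ===== LEMMAS AND PROOFS =====

theorem pv_lowerChar_slash (c : Char) (h : PySem.Chars.lowerChar c = '/') : c = '/' := by
  unfold PySem.Chars.lowerChar PySem.Chars.isupper at h
  split at h
  · rename_i hu
    simp at hu
    obtain ⟨h1, h2⟩ := hu
    have h1' : 65 ≤ c.toNat := h1
    have h2' : c.toNat ≤ 90 := h2
    have hv : (Char.ofNat (c.toNat + 32)).toNat = c.toNat + 32 := by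
      rw [Char.toNat_ofNat, if_pos]
      unfold Nat.isValidChar; omega
    rw [h] at hv
    have : ('/').toNat = 47 := by decide
    omega
  · exact h

theorem pv_slash_lower (l : List Char) (h : '/' ∉ l) : '/' ∉ PySem.Chars.lower l := by
  intro hm
  simp [PySem.Chars.lower, List.mem_map] at hm
  obtain ⟨c, hc, he⟩ := hm
  exact h (pv_lowerChar_slash c he ▸ hc)

-- uniqueness of the text before the first '/'
theorem pv_first_slash (a : List Char) (n r t : List Char)
    (ha : '/' ∉ a) (hn : '/' ∉ n) (h : a ++ '/' :: r = n ++ '/' :: t) : a = n := by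
  induction a generalizing n with
  | nil =>
      cases n with
      | nil => rfl
      | cons d n' =>
          simp at h
          exact absurd (h.1 ▸ List.mem_cons_self) hn
  | cons c a' ih =>
      cases n with
      | nil =>
          simp at h
          exact absurd (h.1 ▸ List.mem_cons_self) ha
      | cons d n' =>
          simp at h
          obtain ⟨hcd, h'⟩ := h
          have := ih n' (fun hm => ha (List.mem_cons_of_mem _ hm))
            (fun hm => hn (List.mem_cons_of_mem _ hm)) h'
          rw [hcd, this]

-- partition spec: either no '/' occurs, or the input splits at its first '/'
theorem pv_part_spec (l : List Char) :
    ((pvPartition '/' l).2.1 = [] ∧ (pvPartition '/' l).1 = l ∧ (pvPartition '/' l).2.2 = [] ∧ '/' ∉ l)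
    ∨ ((pvPartition '/' l).2.1 = ['/'] ∧ '/' ∉ (pvPartition '/' l).1 ∧
        l = (pvPartition '/' l).1 ++ '/' :: (pvPartition '/' l).2.2) := by
  induction l with
  | nil => left; exact ⟨rfl, rfl, rfl, by simp⟩
  | cons c cs ih =>
      by_cases hc : c = '/'
      · right
        subst hc
        simp [pvPartition]
      · rcases ih with ⟨h1, h2, h3, h4⟩ | ⟨h1, h2, h3⟩
        · left
          simp only [pvPartition, if_neg hc]
          refine ⟨h1, by rw [h2], h3, ?_⟩
          intro hm
          rcases List.mem_cons.mp hm with he | hm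
          · exact hc he.symm
          · exact h4 hm
        · right
          simp only [pvPartition, if_neg hc]
          refine ⟨h1, ?_, ?_⟩
          · intro hm
            rcases List.mem_cons.mp hm with he | hm
            · exact hc he.symm
            · exact h2 hm
          · rw [List.cons_append, ← h3]

-- A's test 'model.lower().startswith(n + "/")' characterised through B's partition
theorem pv_sw (l n : List Char) (hn : '/' ∉ n) :
    (PySem.Chars.startswith (PySem.Chars.lower l) (n ++ ['/']) = true ↔
      ((pvPartition '/' l).2.1 = ['/'] ∧ PySem.Chars.lower (pvPartition '/' l).1 = n)) := by
  rw [PySem.Chars.startswith_iff]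
  rcases pv_part_spec l with ⟨h1, h2, h3, h4⟩ | ⟨h1, h2, h3⟩
  · constructor
    · intro hp
      exfalso
      have hmem : '/' ∈ PySem.Chars.lower l := by
        have : '/' ∈ n ++ ['/'] := by simp
        exact hp.sublist.mem this
      exact pv_slash_lower l h4 hmem
    · intro ⟨hs, _⟩
      rw [h1] at hs
      cases hs
  · have hlow : PySem.Chars.lower l =
        PySem.Chars.lower (pvPartition '/' l).1 ++ '/' :: PySem.Chars.lower (pvPartition '/' l).2.2 := by
      conv_lhs => rw [h3]
      simp [PySem.Chars.lower]
      decide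
    constructor
    · intro hp
      refine ⟨h1, ?_⟩
      obtain ⟨t, ht⟩ := hp
      rw [hlow] at ht
      have ht' : n ++ '/' :: t = PySem.Chars.lower (pvPartition '/' l).1 ++ '/' :: PySem.Chars.lower (pvPartition '/' l).2.2 := by
        simpa using ht
      exact (pv_first_slash n _ _ _ hn (pv_slash_lower _ h2) ht').symm
    · intro ⟨_, hh⟩
      rw [hlow, ← hh]
      exact ⟨PySem.Chars.lower (pvPartition '/' l).2.2, by simp⟩

-- the heart of the equivalence: A's prefix loop computes exactly B's partition-based bare model
theorem pv_bare (l : List Char) :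
    pvStripLoop l ["gemini/".toList, "openai/".toList, "anthropic/".toList, "xai/".toList] =
      (if (!(pvPartition '/' l).2.1.isEmpty) && pvDict.contains (PySem.Chars.lower (pvPartition '/' l).1)
       then (pvPartition '/' l).2.2 else l) := by
  have e1 : ("gemini/".toList : List Char) = "gemini".toList ++ ['/'] := by decide
  have e2 : ("openai/".toList : List Char) = "openai".toList ++ ['/'] := by decide
  have e3 : ("anthropic/".toList : List Char) = "anthropic".toList ++ ['/'] := by decide
  have e4 : ("xai/".toList : List Char) = "xai".toList ++ ['/'] := by decide
  have hkeys : pvDict.keys = ["gemini".toList, "openai".toList, "anthropic".toList, "xai".toList] := by decide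
  rcases pv_part_spec l with ⟨hs, hh, hr, hnl⟩ | ⟨hs, hnh, hl⟩
  · -- no '/' in the model: the loop matches no prefix, the partition has an empty separator
    have hswF : ∀ n : List Char, '/' ∉ n →
        PySem.Chars.startswith (PySem.Chars.lower l) (n ++ ['/']) = false := by
      intro n hn
      rw [Bool.eq_false_iff]
      intro htrue
      have := (pv_sw l n hn).mp htrue
      rw [hs] at this
      exact absurd this.1 (by simp)
    rw [hs]
    simp only [pvStripLoop, e1, e2, e3, e4,
      hswF "gemini".toList (by decide), hswF "openai".toList (by decide),
      hswF "anthropic".toList (by decide), hswF "xai".toList (by decide),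
      Bool.false_eq_true, if_false, List.isEmpty_nil, Bool.not_true, Bool.false_and]
  · -- the model splits as h ++ '/' :: r at its first '/'
    have hswI : ∀ n : List Char, '/' ∉ n →
        (PySem.Chars.startswith (PySem.Chars.lower l) (n ++ ['/']) = true ↔
          PySem.Chars.lower (pvPartition '/' l).1 = n) := by
      intro n hn
      rw [pv_sw l n hn, hs]
      simp
    have hdrop : ∀ k : Nat, (pvPartition '/' l).1.length = k →
        l.drop (k + 1) = (pvPartition '/' l).2.2 := by
      intro k hk
      conv_lhs => rw [hl]
      have hsplit : (pvPartition '/' l).1 ++ '/' :: (pvPartition '/' l).2.2 =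
          ((pvPartition '/' l).1 ++ ['/']) ++ (pvPartition '/' l).2.2 := by simp
      have h7 : ((pvPartition '/' l).1 ++ ['/']).length = k + 1 := by simp [hk]
      rw [hsplit, ← h7, List.drop_left]
    have hlenlow : (PySem.Chars.lower (pvPartition '/' l).1).length = (pvPartition '/' l).1.length := by
      simp [PySem.Chars.lower]
    by_cases hg : PySem.Chars.lower (pvPartition '/' l).1 = "gemini".toList
    · have s1 : PySem.Chars.startswith (PySem.Chars.lower l) ("gemini/".toList) = true := by
        rw [e1]; exact (hswI _ (by decide)).mpr hg
      have hcond : ((!((['/'] : List Char)).isEmpty) && pvDict.contains ("gemini".toList)) = true := by decide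
      have hlen : (pvPartition '/' l).1.length = 6 := by
        rw [← hlenlow, hg]; decide
      have hslice : PySem.List.len ("gemini/".toList) = ((7 : Nat) : Int) := by decide
      simp only [pvStripLoop, s1, if_true, hs, hg, hcond, hslice,
        PySem.List.slice_from_natCast]
      exact hdrop 6 hlen
    · have s1 : PySem.Chars.startswith (PySem.Chars.lower l) ("gemini/".toList) = false := by
        rw [e1, Bool.eq_false_iff]
        intro ht; exact hg ((hswI _ (by decide)).mp ht)
      by_cases ho : PySem.Chars.lower (pvPartition '/' l).1 = "openai".toList
      · have s2 : PySem.Chars.startswith (PySem.Chars.lower l) ("openai/".toList) = true := by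
          rw [e2]; exact (hswI _ (by decide)).mpr ho
        have hcond : ((!((['/'] : List Char)).isEmpty) && pvDict.contains ("openai".toList)) = true := by decide
        have hlen : (pvPartition '/' l).1.length = 6 := by
          rw [← hlenlow, ho]; decide
        have hslice : PySem.List.len ("openai/".toList) = ((7 : Nat) : Int) := by decide
        simp only [pvStripLoop, s1, s2, Bool.false_eq_true, if_false, if_true, hs, ho, hcond, hslice,
          PySem.List.slice_from_natCast]
        exact hdrop 6 hlen
      · have s2 : PySem.Chars.startswith (PySem.Chars.lower l) ("openai/".toList) = false := by
          rw [e2, Bool.eq_false_iff]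
          intro ht; exact ho ((hswI _ (by decide)).mp ht)
        by_cases ha : PySem.Chars.lower (pvPartition '/' l).1 = "anthropic".toList
        · have s3 : PySem.Chars.startswith (PySem.Chars.lower l) ("anthropic/".toList) = true := by
            rw [e3]; exact (hswI _ (by decide)).mpr ha
          have hcond : ((!((['/'] : List Char)).isEmpty) && pvDict.contains ("anthropic".toList)) = true := by decide
          have hlen : (pvPartition '/' l).1.length = 9 := by
            rw [← hlenlow, ha]; decide
          have hslice : PySem.List.len ("anthropic/".toList) = ((10 : Nat) : Int) := by decide
          simp only [pvStripLoop, s1, s2, s3, Bool.false_eq_true, if_false, if_true, hs, ha, hcond, hslice,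
            PySem.List.slice_from_natCast]
          exact hdrop 9 hlen
        · have s3 : PySem.Chars.startswith (PySem.Chars.lower l) ("anthropic/".toList) = false := by
            rw [e3, Bool.eq_false_iff]
            intro ht; exact ha ((hswI _ (by decide)).mp ht)
          by_cases hx : PySem.Chars.lower (pvPartition '/' l).1 = "xai".toList
          · have s4 : PySem.Chars.startswith (PySem.Chars.lower l) ("xai/".toList) = true := by
              rw [e4]; exact (hswI _ (by decide)).mpr hx
            have hcond : ((!((['/'] : List Char)).isEmpty) && pvDict.contains ("xai".toList)) = true := by decide
            have hlen : (pvPartition '/' l).1.length = 3 := by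
              rw [← hlenlow, hx]; decide
            have hslice : PySem.List.len ("xai/".toList) = ((4 : Nat) : Int) := by decide
            simp only [pvStripLoop, s1, s2, s3, s4, Bool.false_eq_true, if_false, if_true, hs, hx, hcond, hslice,
              PySem.List.slice_from_natCast]
            exact hdrop 3 hlen
          · have s4 : PySem.Chars.startswith (PySem.Chars.lower l) ("xai/".toList) = false := by
              rw [e4, Bool.eq_false_iff]
              intro ht; exact hx ((hswI _ (by decide)).mp ht)
            have hcontains : pvDict.contains (PySem.Chars.lower (pvPartition '/' l).1) = false := by
              rw [PySem.Dict.contains_eq_decide_mem_keys, hkeys]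
              simp only [List.mem_cons, List.not_mem_nil, or_false, decide_eq_false_iff_not]
              push Not
              exact ⟨by simpa using hg, by simpa using ho, by simpa using ha, by simpa using hx⟩
            simp only [pvStripLoop, s1, s2, s3, s4, Bool.false_eq_true, if_false,
              hs, hcontains, Bool.and_false]

-- ===== VERDICT (by name: the statement is the Claim_ definition above) =====
theorem rewrite_for_openrouter_py_spec : Claim_equal_rewrite_for_openrouter_py := by
  intro model provider _
  unfold Spec_rewrite_for_openrouter_py
  unfold rewrite_for_openrouter_py rewrite_for_openrouter_py_alt
  rw [pv_bare model.toList]
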